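-- pv_equiv track=rewrite | github.com/gemseo/gemseo | src/gemseo/core/coupling_structure.py | _compute_graph
-- ===== SOURCE A (Python) =====
-- def _compute_graph(nodes):
--     """Computes the successors_i of each node and the edges between
--     the nodes.
--
--     :param nodes: the nodes of the graph
--     """
--     graph = {}
--     disc_i = 0
--     edges = {}
--
--     for (_, outputs_i) in nodes:
--         successors_i = set()
--         # find out in which discipline(s) the outputs_i are used
--         for output_i in outputs_i:
--             disc_j = 0
--             for (inputs_j, _) in nodes:
--                 if disc_i != disc_j and output_i in inputs_j:
--                     successors_i.add(disc_j)
--                     # add the edge disc_i -> disc_j with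
--                     # label output_i
--                     if disc_i not in edges:
--                         edges[disc_i] = {}
--                     if disc_j not in edges[disc_i]:
--                         edges[disc_i][disc_j] = []
--                     edges[disc_i][disc_j].append(output_i)
--                 disc_j += 1
--
--         graph[disc_i] = successors_i
--         disc_i += 1
--     return graph, edges
-- ===== SOURCE B (Python) =====
-- def _compute_graph(nodes):
--     """Computes the successors_i of each node and the edges between
--     the nodes.
--
--     :param nodes: the nodes of the graph
--     """
--     # invert once: input variable -> ascending list of disciplines consuming it
--     index = {}
--     for disc_j, (inputs_j, _) in enumerate(nodes):
--         for var in inputs_j: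
--             lst = index.setdefault(var, [])
--             if not lst or lst[-1] != disc_j:
--                 lst.append(disc_j)
--
--     graph = {}
--     edges = {}
--     for disc_i, (_, outputs_i) in enumerate(nodes):
--         successors_i = set()
--         for output_i in outputs_i:
--             for disc_j in index.get(output_i, []):
--                 if disc_j != disc_i:
--                     successors_i.add(disc_j)
--                     edges.setdefault(disc_i, {}).setdefault(disc_j, []).append(output_i)
--         graph[disc_i] = successors_i
--     return graph, edges
-- ===== Notes on version B (the rewrite author's own statement) =====
-- stated objective: faster
-- what changed: Instead of scanning all N disciplines' input lists for every output variable (A's nested N*vars*N scan), B builds one inverted index mapping each input variable to the ascending list of disciplines consuming it, then looks consumers up per output.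
import Mathlib
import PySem

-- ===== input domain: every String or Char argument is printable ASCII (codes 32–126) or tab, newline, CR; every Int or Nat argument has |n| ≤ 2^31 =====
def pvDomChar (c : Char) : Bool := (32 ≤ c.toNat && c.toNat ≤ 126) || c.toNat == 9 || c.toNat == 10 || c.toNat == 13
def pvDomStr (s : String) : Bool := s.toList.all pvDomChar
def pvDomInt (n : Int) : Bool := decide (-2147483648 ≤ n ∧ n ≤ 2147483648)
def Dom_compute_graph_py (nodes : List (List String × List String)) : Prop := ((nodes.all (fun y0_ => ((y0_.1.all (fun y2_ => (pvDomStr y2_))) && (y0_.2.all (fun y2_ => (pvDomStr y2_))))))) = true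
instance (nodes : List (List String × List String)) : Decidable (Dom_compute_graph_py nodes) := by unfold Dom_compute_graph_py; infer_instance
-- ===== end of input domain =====

-- B replaces A's inner scan of every discipline's inputs per output variable by one
-- inverted index (input variable -> consuming disciplines), built once; same result.

-- ===== PORT A =====
-- 'if disc_i not in edges: edges[disc_i] = {}': then 'if disc_j not in edges[disc_i]: … = []', then append
def pvAddEdgeA (i j : Int) (out : String)
    (e : PySem.Dict Int (PySem.Dict Int (List String))) :
    PySem.Dict Int (PySem.Dict Int (List String)) :=
  let e1 := if e.contains i then e else e.insert i PySem.Dict.empty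
  let inner := e1.getD i PySem.Dict.empty
  let inner1 := if inner.contains j then inner else inner.insert j []
  e1.insert i (inner1.insert j (inner1.getD j [] ++ [out]))

def compute_graph_py (nodes : List (List String × List String)) :
    (List (Int × List Int)) × (List (Int × List (Int × List String))) :=
  -- disc_i / disc_j counters = enumerate over nodes
  let res :=
    (PySem.List.enumerate nodes 0).foldl
      (fun (ge : PySem.Dict Int (PySem.Set Int) × PySem.Dict Int (PySem.Dict Int (List String))) p =>
        let se :=
          p.2.2.foldl
            (fun se out =>
              (PySem.List.enumerate nodes 0).foldl
                (fun se2 q =>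
                  if p.1 ≠ q.1 ∧ out ∈ q.2.1 then
                    (PySem.Set.add se2.1 q.1, pvAddEdgeA p.1 q.1 out se2.2)
                  else se2)
                se)
            ((PySem.Set.empty : PySem.Set Int), ge.2)
        (ge.1.insert p.1 se.1, se.2))
      (PySem.Dict.empty, PySem.Dict.empty)
  (res.1.items, res.2.items.map (fun p => (p.1, p.2.items)))

-- ===== PORT B =====
-- 'lst = index.setdefault(var, []); if not lst or lst[-1] != disc_j: lst.append(disc_j)'
def pvIdxStep (j : Int) (d : PySem.Dict String (List Int)) (v : String) :
    PySem.Dict String (List Int) :=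
  let lst := d.getD v []
  d.insert v (if lst = [] ∨ lst.getLast? ≠ some j then lst ++ [j] else lst)

def pvBuildIndex (nodes : List (List String × List String)) : PySem.Dict String (List Int) :=
  (PySem.List.enumerate nodes 0).foldl
    (fun d p => p.2.1.foldl (fun d v => pvIdxStep p.1 d v) d) PySem.Dict.empty

-- 'edges.setdefault(disc_i, {}).setdefault(disc_j, []).append(output_i)'
def pvAddEdgeB (i j : Int) (out : String)
    (e : PySem.Dict Int (PySem.Dict Int (List String))) :
    PySem.Dict Int (PySem.Dict Int (List String)) :=
  let inner := e.getD i PySem.Dict.empty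
  e.insert i (inner.insert j (inner.getD j [] ++ [out]))

def compute_graph_py_alt (nodes : List (List String × List String)) :
    (List (Int × List Int)) × (List (Int × List (Int × List String))) :=
  let idx := pvBuildIndex nodes
  let res :=
    (PySem.List.enumerate nodes 0).foldl
      (fun (ge : PySem.Dict Int (PySem.Set Int) × PySem.Dict Int (PySem.Dict Int (List String))) p =>
        let se :=
          p.2.2.foldl
            (fun se out =>
              (idx.getD out []).foldl
                (fun se2 j =>
                  if j ≠ p.1 then
                    (PySem.Set.add se2.1 j, pvAddEdgeB p.1 j out se2.2)
                  else se2)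
                se)
            ((PySem.Set.empty : PySem.Set Int), ge.2)
        (ge.1.insert p.1 se.1, se.2))
      (PySem.Dict.empty, PySem.Dict.empty)
  (res.1.items, res.2.items.map (fun p => (p.1, p.2.items)))

-- ===== PRECONDITION & SPEC =====
def Spec_compute_graph_py (nodes : List (List String × List String)) (out : (List (Int × List Int)) × (List (Int × List (Int × List String)))) : Prop := out = compute_graph_py_alt nodes
instance (nodes : List (List String × List String)) (out : (List (Int × List Int)) × (List (Int × List (Int × List String)))) : Decidable (Spec_compute_graph_py nodes out) := by unfold Spec_compute_graph_py; infer_instance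

-- ===== CLAIM (what is proved, stated in full; the proofs are below) =====
def Claim_equal_compute_graph_py : Prop := ∀ (nodes : List (List String × List String)), Dom_compute_graph_py nodes → Spec_compute_graph_py nodes (compute_graph_py nodes)

-- ===== LEMMAS AND PROOFS =====

-- the two edge updates coincide
theorem pvAddEdge_eq (i j : Int) (out : String)
    (e : PySem.Dict Int (PySem.Dict Int (List String))) :
    pvAddEdgeA i j out e = pvAddEdgeB i j out e := by
  unfold pvAddEdgeA pvAddEdgeB
  by_cases hi : e.contains i = true
  · simp only [hi, if_true]
    by_cases hj : (PySem.Dict.getD e i PySem.Dict.empty).contains j = true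
    · simp [hj]
    · simp only [Bool.not_eq_true] at hj
      simp [hj, PySem.Dict.getD_insert_self, PySem.Dict.getD_of_not_contains _ _ hj,
        PySem.Dict.insert_insert_self]
  · simp only [Bool.not_eq_true] at hi
    simp only [hi]
    have h1 : (e.insert i PySem.Dict.empty).getD i PySem.Dict.empty = PySem.Dict.empty :=
      PySem.Dict.getD_insert_self _ _ _ _
    simp [h1, PySem.Dict.getD_of_not_contains _ _ hi, PySem.Dict.insert_insert_self,
      PySem.Dict.getD_empty, PySem.Dict.contains_empty, PySem.Dict.getD_insert_self]

-- one discipline's inputs folded into the index: appends j at v iff v ∈ inputs and j not already last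
theorem pvIdxStep_foldl (inputs : List String) (j : Int) :
    ∀ (d : PySem.Dict String (List Int)) (v : String),
      (inputs.foldl (fun d v => pvIdxStep j d v) d).getD v []
        = d.getD v [] ++
            (if v ∈ inputs ∧ (d.getD v []).getLast? ≠ some j then [j] else []) := by
  induction inputs with
  | nil => intro d v; simp
  | cons w rest ih =>
    intro d v
    simp only [List.foldl_cons]
    rw [ih]
    unfold pvIdxStep
    by_cases hvw : v = w
    · subst hvw
      by_cases hl : (d.getD v []).getLast? = some j
      · have hne : d.getD v [] ≠ [] := by
          intro h; rw [h] at hl; simp at hl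
        simp [hne, hl, PySem.Dict.getD_insert_self]
      · simp [hl, PySem.Dict.getD_insert_self]
    · rw [PySem.Dict.getD_insert_of_ne _ _ _ hvw]
      simp [hvw]

-- the full index: index[v] is the ascending list of disciplines whose inputs contain v
theorem pvBuildIndex_foldl (l : List (List String × List String)) :
    ∀ (s : Int) (d : PySem.Dict String (List Int)),
      (∀ w x, x ∈ d.getD w [] → x < s) →
      ∀ v,
        ((PySem.List.enumerate l s).foldl
            (fun d p => p.2.1.foldl (fun d v => pvIdxStep p.1 d v) d) d).getD v []
          = d.getD v []
              ++ ((PySem.List.enumerate l s).filter (fun p => decide (v ∈ p.2.1))).map (·.1) := by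
  induction l with
  | nil => intro s d _ v; simp [PySem.List.enumerate]
  | cons x rest ih =>
    intro s d H v
    rw [PySem.List.enumerate_cons]
    simp only [List.foldl_cons, List.filter_cons]
    have hstep : ∀ w, ((x.1.foldl (fun d v => pvIdxStep s d v) d).getD w [])
        = d.getD w [] ++ (if w ∈ x.1 then [s] else []) := by
      intro w
      rw [pvIdxStep_foldl]
      have hlast : (d.getD w []).getLast? ≠ some s := by
        intro h
        have hm : s ∈ d.getD w [] := List.mem_of_getLast? h
        exact absurd (H w s hm) (lt_irrefl s)
      simp [hlast]
    have H' : ∀ w y, y ∈ (x.1.foldl (fun d v => pvIdxStep s d v) d).getD w [] → y < s + 1 := by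
      intro w y hy
      rw [hstep] at hy
      rcases List.mem_append.mp hy with h | h
      · exact lt_trans (H w y h) (by omega)
      · by_cases hw : w ∈ x.1
        · simp [hw] at h; omega
        · simp [hw] at h
    rw [ih (s + 1) _ H' v, hstep]
    by_cases hv : v ∈ x.1
    · simp [hv]
    · simp [hv]

theorem pvBuildIndex_getD (nodes : List (List String × List String)) (v : String) :
    (pvBuildIndex nodes).getD v []
      = ((PySem.List.enumerate nodes 0).filter (fun p => decide (v ∈ p.2.1))).map (·.1) := by
  unfold pvBuildIndex
  rw [pvBuildIndex_foldl nodes 0 PySem.Dict.empty (by simp [PySem.Dict.getD_empty]) v]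
  simp [PySem.Dict.getD_empty]

-- ===== VERDICT (by name: the statement is the Claim_ definition above) =====
theorem compute_graph_py_spec : Claim_equal_compute_graph_py := by
  intro nodes _
  unfold Spec_compute_graph_py compute_graph_py compute_graph_py_alt
  have hstep :
      (fun (ge : PySem.Dict Int (PySem.Set Int) × PySem.Dict Int (PySem.Dict Int (List String))) (p : Int × (List String × List String)) =>
        let se :=
          p.2.2.foldl
            (fun se out =>
              (PySem.List.enumerate nodes 0).foldl
                (fun se2 q =>
                  if p.1 ≠ q.1 ∧ out ∈ q.2.1 then
                    (PySem.Set.add se2.1 q.1, pvAddEdgeA p.1 q.1 out se2.2)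
                  else se2)
                se)
            ((PySem.Set.empty : PySem.Set Int), ge.2)
        (ge.1.insert p.1 se.1, se.2))
      = (fun ge p =>
        let se :=
          p.2.2.foldl
            (fun se out =>
              ((pvBuildIndex nodes).getD out []).foldl
                (fun se2 j =>
                  if j ≠ p.1 then
                    (PySem.Set.add se2.1 j, pvAddEdgeB p.1 j out se2.2)
                  else se2)
                se)
            ((PySem.Set.empty : PySem.Set Int), ge.2)
        (ge.1.insert p.1 se.1, se.2)) := by
    funext ge p
    have hinner : ∀ (out : String)
        (se : PySem.Set Int × PySem.Dict Int (PySem.Dict Int (List String))),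
        (PySem.List.enumerate nodes 0).foldl
            (fun se2 q =>
              if p.1 ≠ q.1 ∧ out ∈ q.2.1 then
                (PySem.Set.add se2.1 q.1, pvAddEdgeA p.1 q.1 out se2.2)
              else se2) se
          = ((pvBuildIndex nodes).getD out []).foldl
              (fun se2 j =>
                if j ≠ p.1 then
                  (PySem.Set.add se2.1 j, pvAddEdgeB p.1 j out se2.2)
                else se2) se := by
      intro out se
      rw [PySem.List.foldl_ite_eq_foldl_filter, pvBuildIndex_getD,
        PySem.List.foldl_ite_eq_foldl_filter, List.filter_map, List.foldl_map,
        List.filter_filter]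
      have hfun :
          (fun (x : PySem.Set Int × PySem.Dict Int (PySem.Dict Int (List String)))
              (y : Int × (List String × List String)) =>
            (PySem.Set.add x.1 y.1, pvAddEdgeB p.1 y.1 out x.2))
          = (fun x y => (PySem.Set.add x.1 y.1, pvAddEdgeA p.1 y.1 out x.2)) := by
        funext x y
        rw [pvAddEdge_eq]
      rw [hfun]
      congr 1
      apply List.filter_congr
      intro q _
      simp only [Function.comp]
      by_cases h1 : q.1 = p.1 <;> by_cases h2 : out ∈ q.2.1 <;>
        simp [h1, h2, Ne.symm]
    simp only [hinner]
  rw [hstep]
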